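-- pv_equiv track=rewrite | github.com/svalkiers/clusTCR | clustcr/modules/prioritcr/tools.py | hamming_intersection
-- ===== SOURCE A (Python) =====
-- from collections import defaultdict
-- from itertools import chain, repeat, combinations
--
-- def hamming_intersection(set1: set, set2: set):
--     """
--     returns the intersection of sequences from set1 and set2,
--     including sequences in set2 that are a hamming distance of 1 away
--     from a sequence in set1
--     """
--     d = defaultdict(lambda: defaultdict(set))
--     # dict(sequence_hash : dict(1 : set[sequences], 2 : set[sequences]))
--     for s, i in chain(zip(set1, repeat(1)), zip(set2, repeat(2))):
--         for hash in (s[::2], s[1::2]):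
--             d[hash][i].add(s)
--
--     return {
--         s2
--         for m in d.values()
--         for s1 in m[1]
--         for s2 in m[2]
--         if len(s1) == len(s2)
--         if sum([aa1 != aa2 for aa1, aa2 in zip(s1, s2)]) <= 1
--     }
-- ===== SOURCE B (Python) =====
-- def hamming_intersection(set1: set, set2: set):
--     """
--     returns the intersection of sequences from set1 and set2,
--     including sequences in set2 that are a hamming distance of 1 away
--     from a sequence in set1
--     """
--     # index every set1 sequence under one-position-deletion keys (length, position, rest)
--     index = {(len(s), i, s[:i] + s[i + 1:]) for s in set1 for i in range(len(s))}
--     return {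
--         s2
--         for s2 in set2
--         if s2 in set1
--         or any((len(s2), i, s2[:i] + s2[i + 1:]) in index for i in range(len(s2)))
--     }
-- ===== Notes on version B (the rewrite author's own statement) =====
-- stated objective: faster
-- what changed: A buckets all sequences by their even- and odd-position subsequences and tests every set1 x set2 pair inside each bucket; B instead builds a hash-set index of set1 under one-position-deletion keys (len, i, s[:i]+s[i+1:]) and answers each set2 sequence by O(len) key lookups, removing the per-bucket pairwise scan.
import Mathlib
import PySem

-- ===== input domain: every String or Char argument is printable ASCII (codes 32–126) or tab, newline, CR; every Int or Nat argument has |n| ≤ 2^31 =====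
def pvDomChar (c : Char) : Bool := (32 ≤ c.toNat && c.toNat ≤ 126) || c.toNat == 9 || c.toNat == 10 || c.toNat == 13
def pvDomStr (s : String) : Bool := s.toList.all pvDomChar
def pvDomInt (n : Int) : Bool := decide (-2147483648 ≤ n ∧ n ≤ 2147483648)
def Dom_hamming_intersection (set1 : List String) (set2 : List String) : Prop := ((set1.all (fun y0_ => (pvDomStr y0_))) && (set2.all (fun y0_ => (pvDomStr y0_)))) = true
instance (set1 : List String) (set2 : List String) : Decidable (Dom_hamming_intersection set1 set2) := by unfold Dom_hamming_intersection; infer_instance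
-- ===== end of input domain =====

-- B replaces A's even/odd-subsequence bucketing (pairing set1 x set2 inside every bucket) by a
-- one-position-deletion key index over set1 queried once per set2 sequence (alternative algorithm).
-- Both Pythons return a SET, whose iteration order is not modelled; each port lists that set's
-- elements in set2's first-occurrence order, which is exact as a set (outputs are compared as sets).

-- ===== PORT A =====
-- s[::2]  (step 2 is never 0, so the slice never raises; the getD [] default is never taken)
def pvHash1 (s : String) : String := String.ofList ((PySem.List.slice? s.toList none none 2).getD [])
-- s[1::2]
def pvHash2 (s : String) : String := String.ofList ((PySem.List.slice? s.toList (some 1) none 2).getD [])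
-- the two comprehension filters: len(s1) == len(s2), sum([aa1 != aa2 for aa1, aa2 in zip(s1, s2)]) <= 1
def pvClose (s1 s2 : String) : Bool :=
  PySem.Str.len s1 == PySem.Str.len s2 &&
    decide ((((s1.toList.zip s2.toList).map (fun p => if p.1 ≠ p.2 then (1 : Int) else 0)).sum) ≤ 1)
-- one iteration of the building loop: for hash in (s[::2], s[1::2]): d[hash][i].add(s)
def pvStep (d : PySem.Dict String (PySem.Dict Int (PySem.Set String))) (p : String × Int) :
    PySem.Dict String (PySem.Dict Int (PySem.Set String)) :=
  [pvHash1 p.1, pvHash2 p.1].foldl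
    (fun d h => d.modify h PySem.Dict.empty
      (fun m => m.modify p.2 PySem.Set.empty (fun t => PySem.Set.add t p.1))) d

def hamming_intersection (set1 : List String) (set2 : List String) : List String :=
  -- for s, i in chain(zip(set1, repeat(1)), zip(set2, repeat(2))): …
  let d := (set1.map (fun s => (s, (1 : Int))) ++ set2.map (fun s => (s, (2 : Int)))).foldl pvStep PySem.Dict.empty
  -- {s2 for m in d.values() for s1 in m[1] for s2 in m[2] if … if …}
  let matched : PySem.Set String :=
    PySem.Set.ofList (d.values.flatMap (fun m =>
      (m.getD 1 PySem.Set.empty).flatMap (fun s1 =>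
        (m.getD 2 PySem.Set.empty).filter (fun s2 => pvClose s1 s2))))
  -- the Python returns this SET; its hash iteration order is not modelled, so the port lists its
  -- elements (each drawn from set2) in set2's first-occurrence order — exact as a set
  (PySem.List.dedup set2).filter (fun s2 => PySem.Set.contains matched s2)

-- ===== PORT B =====
-- s[:i] + s[i+1:]
def pvMask (s : String) (i : Int) : String :=
  String.ofList (PySem.List.slice s.toList none (some i) ++ PySem.List.slice s.toList (some (i + 1)) none)
-- the deletion keys (len(s), i, s[:i] + s[i+1:]) for i in range(len(s))
def pvKeys (s : String) : List (Int × Int × String) :=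
  (PySem.List.pyRange 0 (PySem.Str.len s) 1).map (fun i => (PySem.Str.len s, i, pvMask s i))

def hamming_intersection_alt (set1 : List String) (set2 : List String) : List String :=
  let index : PySem.Set (Int × Int × String) := PySem.Set.ofList (set1.flatMap pvKeys)
  PySem.Set.ofList (set2.filter (fun s2 =>
    set1.contains s2 || (pvKeys s2).any (fun k => PySem.Set.contains index k)))

-- ===== PRECONDITION & SPEC =====
def Spec_hamming_intersection (set1 : List String) (set2 : List String) (out : List String) : Prop := out = hamming_intersection_alt set1 set2
instance (set1 : List String) (set2 : List String) (out : List String) : Decidable (Spec_hamming_intersection set1 set2 out) := by unfold Spec_hamming_intersection; infer_instance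

-- ===== CLAIM (what is proved, stated in full; the proofs are below) =====
def Claim_equal_hamming_intersection : Prop := ∀ (set1 : List String) (set2 : List String), Dom_hamming_intersection set1 set2 → Spec_hamming_intersection set1 set2 (hamming_intersection set1 set2)

-- ===== LEMMAS AND PROOFS =====

-- the chained pair list A's building loop runs over
def pvL (set1 set2 : List String) : List (String × Int) :=
  set1.map (fun s => (s, (1 : Int))) ++ set2.map (fun s => (s, (2 : Int)))

theorem pv_mem_L (set1 set2 : List String) (s : String) (i : Int) :
    ((s, i) ∈ pvL set1 set2) ↔ (s ∈ set1 ∧ i = 1) ∨ (s ∈ set2 ∧ i = 2) := by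
  simp only [pvL, List.mem_append, List.mem_map, Prod.mk.injEq]
  constructor
  · rintro (⟨a, ha, rfl, rfl⟩ | ⟨a, ha, rfl, rfl⟩)
    · exact Or.inl ⟨ha, rfl⟩
    · exact Or.inr ⟨ha, rfl⟩
  · rintro (⟨ha, rfl⟩ | ⟨ha, rfl⟩)
    · exact Or.inl ⟨s, ha, rfl, rfl⟩
    · exact Or.inr ⟨s, ha, rfl, rfl⟩

-- set(filter) commutes with first-occurrence dedup
theorem pv_ofList_filter {α : Type} [BEq α] [LawfulBEq α] (p : α → Bool) (l : List α) :
    PySem.Set.ofList (l.filter p) = (PySem.Set.ofList l).filter p := by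
  induction l with
  | nil => rfl
  | cons x l ih =>
    rw [PySem.Set.ofList_cons]
    by_cases hp : p x = true
    · rw [List.filter_cons_of_pos hp, PySem.Set.ofList_cons, ih]
      rw [List.filter_cons_of_pos hp]
      simp only [PySem.Set.discard, List.filter_filter]
      congr 1
      apply List.filter_congr
      intro a _
      rw [Bool.and_comm]
    · rw [List.filter_cons_of_neg hp, ih, List.filter_cons_of_neg hp]
      simp only [PySem.Set.discard, List.filter_filter]
      apply List.filter_congr
      intro a _
      by_cases hax : a = x
      · subst hax; simp [hp]
      · simp [hax]

-- one building step, membership in the inner sets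
set_option maxHeartbeats 2000000 in
theorem pv_mem_step (d : PySem.Dict String (PySem.Dict Int (PySem.Set String)))
    (q : String × Int) (h : String) (i : Int) (s : String) :
    (s ∈ ((pvStep d q).getD h PySem.Dict.empty).getD i PySem.Set.empty) ↔
      s ∈ (d.getD h PySem.Dict.empty).getD i PySem.Set.empty ∨
        (s = q.1 ∧ i = q.2 ∧ (h = pvHash1 q.1 ∨ h = pvHash2 q.1)) := by
  obtain ⟨s', i'⟩ := q
  simp only [pvStep, List.foldl]
  simp only [PySem.Dict.getD_modify,
    apply_ite (fun m : PySem.Dict Int (PySem.Set String) => m.getD i PySem.Set.empty)]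
  split_ifs <;> simp_all [PySem.Set.mem_add]

theorem pv_mem_buildD (L : List (String × Int))
    (d : PySem.Dict String (PySem.Dict Int (PySem.Set String))) (h : String) (i : Int) (s : String) :
    (s ∈ ((L.foldl pvStep d).getD h PySem.Dict.empty).getD i PySem.Set.empty) ↔
      s ∈ (d.getD h PySem.Dict.empty).getD i PySem.Set.empty ∨
        ((s, i) ∈ L ∧ (h = pvHash1 s ∨ h = pvHash2 s)) := by
  induction L generalizing d with
  | nil => simp
  | cons q L ih =>
    rw [List.foldl_cons, ih, pv_mem_step]
    simp only [List.mem_cons, Prod.ext_iff]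
    constructor
    · rintro ((hm | ⟨rfl, rfl, hh⟩) | ⟨hm, hh⟩)
      · exact Or.inl hm
      · exact Or.inr ⟨Or.inl ⟨rfl, rfl⟩, hh⟩
      · exact Or.inr ⟨Or.inr hm, hh⟩
    · rintro (hm | ⟨⟨h1, h2⟩ | hm, hh⟩)
      · exact Or.inl (Or.inl hm)
      · exact Or.inl (Or.inr ⟨h1, h2, by rw [← h1]; exact hh⟩)
      · exact Or.inr ⟨hm, hh⟩

theorem pv_mem_keys_step (d : PySem.Dict String (PySem.Dict Int (PySem.Set String)))
    (q : String × Int) (h : String) :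
    (h ∈ (pvStep d q).keys) ↔ h = pvHash1 q.1 ∨ h = pvHash2 q.1 ∨ h ∈ d.keys := by
  obtain ⟨s', i'⟩ := q
  simp only [pvStep, List.foldl, PySem.Dict.keys_modify, PySem.Dict.mem_keys_insert]
  tauto

theorem pv_mem_keys_buildD (L : List (String × Int))
    (d : PySem.Dict String (PySem.Dict Int (PySem.Set String))) (h : String) :
    (h ∈ (L.foldl pvStep d).keys) ↔
      h ∈ d.keys ∨ ∃ p ∈ L, h = pvHash1 p.1 ∨ h = pvHash2 p.1 := by
  induction L generalizing d with
  | nil => simp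
  | cons q L ih =>
    rw [List.foldl_cons, ih, pv_mem_keys_step]
    simp only [List.mem_cons]
    constructor
    · rintro ((hh | hh | hm) | ⟨p, hp, hh⟩)
      · exact Or.inr ⟨q, Or.inl rfl, Or.inl hh⟩
      · exact Or.inr ⟨q, Or.inl rfl, Or.inr hh⟩
      · exact Or.inl hm
      · exact Or.inr ⟨p, Or.inr hp, hh⟩
    · rintro (hm | ⟨p, rfl | hp, hh⟩)
      · exact Or.inl (Or.inr (Or.inr hm))
      · rcases hh with hh | hh
        · exact Or.inl (Or.inl hh)
        · exact Or.inl (Or.inr (Or.inl hh))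
      · exact Or.inr ⟨p, hp, hh⟩

theorem pv_nodup_keys_step (d : PySem.Dict String (PySem.Dict Int (PySem.Set String)))
    (q : String × Int) (hd : d.keys.Nodup) : (pvStep d q).keys.Nodup := by
  simp only [pvStep, List.foldl, PySem.Dict.keys_modify]
  apply PySem.Dict.nodup_keys_insert
  rw [PySem.Dict.keys_modify]
  exact PySem.Dict.nodup_keys_insert _ _ _ hd

theorem pv_nodup_keys_buildD (L : List (String × Int))
    (d : PySem.Dict String (PySem.Dict Int (PySem.Set String))) (hd : d.keys.Nodup) :
    (L.foldl pvStep d).keys.Nodup := by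
  induction L generalizing d with
  | nil => exact hd
  | cons q L ih => exact ih _ (pv_nodup_keys_step d q hd)

-- mismatch counts on equal-length char lists
theorem pv_count_self (l : List Char) : (l.zip l).countP (fun p => p.1 != p.2) = 0 := by
  induction l with
  | nil => rfl
  | cons a t ih => simp [ih]

theorem pv_count_zero_iff (l1 l2 : List Char) (hl : l1.length = l2.length) :
    (l1.zip l2).countP (fun p => p.1 != p.2) = 0 ↔ l1 = l2 := by
  induction l1 generalizing l2 with
  | nil => cases l2 with
    | nil => simp
    | cons b t2 => simp at hl
  | cons a t1 ih =>
    cases l2 with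
    | nil => simp at hl
    | cons b t2 =>
      have hl' : t1.length = t2.length := by simpa using hl
      simp only [List.zip_cons_cons, List.countP_cons]
      by_cases hab : a = b
      · subst hab
        simp [ih t2 hl']
      · simp [hab]

theorem pv_count_le_one_iff (l1 l2 : List Char) (hl : l1.length = l2.length) :
    (l1.zip l2).countP (fun p => p.1 != p.2) ≤ 1 ↔
      l1 = l2 ∨ ∃ j : Nat, j < l1.length ∧ ∀ k : Nat, k ≠ j → l1[k]? = l2[k]? := by
  induction l1 generalizing l2 with
  | nil => cases l2 with
    | nil => simp
    | cons b t2 => simp at hl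
  | cons a t1 ih =>
    cases l2 with
    | nil => simp at hl
    | cons b t2 =>
      have hl' : t1.length = t2.length := by simpa using hl
      simp only [List.zip_cons_cons, List.countP_cons]
      by_cases hab : a = b
      · subst hab
        have hb : ((a, a).1 != (a, a).2) = false := by simp
        rw [hb, if_neg (by simp), Nat.add_zero, ih t2 hl']
        constructor
        · rintro (rfl | ⟨j, hj, hag⟩)
          · exact Or.inl rfl
          · refine Or.inr ⟨j + 1, by simpa using Nat.succ_lt_succ hj, ?_⟩
            intro k hk
            cases k with
            | zero => simp
            | succ k => simpa using hag k (by omega)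
        · rintro (heq | ⟨j, hj, hag⟩)
          · exact Or.inl (by injection heq)
          · cases j with
            | zero =>
              refine Or.inl (List.ext_getElem? fun k => ?_)
              simpa using hag (k + 1) (by omega)
            | succ j =>
              refine Or.inr ⟨j, by simpa using Nat.lt_of_succ_lt_succ hj, fun k hk => ?_⟩
              simpa using hag (k + 1) (by omega)
      · have hb : ((a, b).1 != (a, b).2) = true := by simpa using hab
        rw [hb, if_pos rfl]
        have h0 : (t1.zip t2).countP (fun p => p.1 != p.2) + 1 ≤ 1 ↔
            (t1.zip t2).countP (fun p => p.1 != p.2) = 0 := by omega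
        rw [h0, pv_count_zero_iff t1 t2 hl']
        constructor
        · rintro rfl
          refine Or.inr ⟨0, by simp, fun k hk => ?_⟩
          cases k with
          | zero => omega
          | succ k => simp
        · rintro (heq | ⟨j, hj, hag⟩)
          · exact absurd (by injection heq) hab
          · cases j with
            | zero =>
              apply List.ext_getElem?
              intro k
              simpa using hag (k + 1) (by omega)
            | succ j => exact absurd (by simpa using hag 0 (by omega)) hab

theorem pv_mask_iff (l1 l2 : List Char) (hl : l1.length = l2.length) (j : Nat) (hj : j < l1.length) :
    (l1.take j ++ l1.drop (j + 1) = l2.take j ++ l2.drop (j + 1)) ↔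
      ∀ k : Nat, k ≠ j → l1[k]? = l2[k]? := by
  constructor
  · intro h k hk
    obtain ⟨ht, hd⟩ := List.append_inj h (by simp [List.length_take]; omega)
    rcases lt_or_ge k j with hkj | hkj
    · have := congrArg (fun l => l[k]?) ht
      simpa [List.getElem?_take, hkj] using this
    · have hkj' : j + 1 ≤ k := by omega
      have := congrArg (fun l => l[k - (j + 1)]?) hd
      simp only [List.getElem?_drop] at this
      rwa [Nat.add_sub_cancel' hkj'] at this
  · intro hag
    have ht : l1.take j = l2.take j := by
      apply List.ext_getElem?
      intro k
      by_cases hkj : k < j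
      · simp [hkj, hag k (by omega)]
      · simp [hkj]
    have hd : l1.drop (j + 1) = l2.drop (j + 1) := by
      apply List.ext_getElem?
      intro k
      simp only [List.getElem?_drop]
      exact hag (j + 1 + k) (by omega)
    rw [ht, hd]

-- s[::2] / s[1::2] depend only on the even / odd positions
theorem pv_ev_congr (l1 l2 : List Char) (hl : l1.length = l2.length)
    (h : ∀ k : Nat, l1[2 * k]? = l2[2 * k]?) :
    PySem.List.slice? l1 none none 2 = PySem.List.slice? l2 none none 2 := by
  simp only [PySem.List.slice?, PySem.List.sliceIndices]
  norm_num
  rw [hl]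
  apply List.filterMap_congr
  intro k _
  have hk : ((2 : Int) * (k : Int)).toNat = 2 * k := by omega
  rw [hk]
  exact h k

theorem pv_od_congr (l1 l2 : List Char) (hl : l1.length = l2.length)
    (h : ∀ k : Nat, l1[2 * k + 1]? = l2[2 * k + 1]?) :
    PySem.List.slice? l1 (some 1) none 2 = PySem.List.slice? l2 (some 1) none 2 := by
  simp only [PySem.List.slice?, PySem.List.sliceIndices]
  norm_num
  rw [hl]
  apply List.filterMap_congr
  intro k hkmem
  by_cases h0 : l2.length = 0
  · simp [h0] at hkmem
  · have hk : (min (1 : Int) (l2.length : Int) + 2 * (k : Int)).toNat = 2 * k + 1 := by omega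
    rw [hk]
    exact h k

theorem pv_share (s1 s2 : String) (hl : s1.toList.length = s2.toList.length) (j : Nat)
    (h : ∀ k : Nat, k ≠ j → s1.toList[k]? = s2.toList[k]?) :
    pvHash1 s1 = pvHash1 s2 ∨ pvHash2 s1 = pvHash2 s2 := by
  rcases Nat.even_or_odd j with hje | hjo
  · right
    have hcong := pv_od_congr s1.toList s2.toList hl (fun k => h (2 * k + 1) (by
      intro hk
      obtain ⟨m, hm⟩ := hje
      omega))
    simp only [pvHash2]
    rw [hcong]
  · left
    have hcong := pv_ev_congr s1.toList s2.toList hl (fun k => h (2 * k) (by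
      intro hk
      obtain ⟨m, hm⟩ := hjo
      omega))
    simp only [pvHash1]
    rw [hcong]

theorem pv_close_iff (s1 s2 : String) :
    pvClose s1 s2 = true ↔
      s1.toList.length = s2.toList.length ∧
        (s1.toList.zip s2.toList).countP (fun p => p.1 != p.2) ≤ 1 := by
  have hf : (fun p : Char × Char => if p.1 ≠ p.2 then (1 : Int) else 0) =
      (fun p : Char × Char => if (p.1 != p.2) = true then (1 : Int) else 0) := by
    funext p
    by_cases hp : p.1 = p.2 <;> simp [hp]
  unfold pvClose
  rw [Bool.and_eq_true, beq_iff_eq, decide_eq_true_iff, hf, PySem.List.sum_map_ite_one_zero]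
  unfold PySem.Str.len
  constructor
  · rintro ⟨h1, h2⟩
    exact ⟨by exact_mod_cast h1, by exact_mod_cast h2⟩
  · rintro ⟨h1, h2⟩
    exact ⟨by exact_mod_cast h1, by exact_mod_cast h2⟩

theorem pv_mask_eq_iff (s1 s2 : String) (j : Nat) :
    pvMask s1 (j : Int) = pvMask s2 (j : Int) ↔
      s1.toList.take j ++ s1.toList.drop (j + 1) = s2.toList.take j ++ s2.toList.drop (j + 1) := by
  have hc : ((j : Int) + 1) = ((j + 1 : Nat) : Int) := by push_cast; ring
  unfold pvMask
  rw [hc, PySem.List.slice_to_natCast, PySem.List.slice_to_natCast,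
    PySem.List.slice_from_natCast, PySem.List.slice_from_natCast]
  constructor
  · intro h
    have := congrArg String.toList h
    simpa using this
  · intro h
    exact congrArg String.ofList h

-- the pointwise core: A's bucket-pair test equals B's deletion-key test
theorem pv_core (s1 s2 : String) :
    ((∃ h : String, (h = pvHash1 s1 ∨ h = pvHash2 s1) ∧ (h = pvHash1 s2 ∨ h = pvHash2 s2)) ∧
        pvClose s1 s2 = true) ↔
      (s1 = s2 ∨ ∃ j : Int, 0 ≤ j ∧ j < PySem.Str.len s2 ∧
        PySem.Str.len s1 = PySem.Str.len s2 ∧ pvMask s1 j = pvMask s2 j) := by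
  constructor
  · rintro ⟨-, hclose⟩
    obtain ⟨hl, hcnt⟩ := (pv_close_iff s1 s2).mp hclose
    rcases (pv_count_le_one_iff _ _ hl).mp hcnt with heq | ⟨j, hj, hag⟩
    · exact Or.inl (String.ext heq)
    · refine Or.inr ⟨(j : Int), Int.natCast_nonneg j, ?_, ?_, ?_⟩
      · show (j : Int) < PySem.Str.len s2
        unfold PySem.Str.len
        exact_mod_cast hl ▸ hj
      · show PySem.Str.len s1 = PySem.Str.len s2
        unfold PySem.Str.len
        exact_mod_cast hl
      · exact (pv_mask_eq_iff s1 s2 j).mpr ((pv_mask_iff _ _ hl j hj).mpr hag)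
  · rintro (rfl | ⟨j, hj0, hjlt, hlen, hmask⟩)
    · refine ⟨⟨pvHash1 s1, Or.inl rfl, Or.inl rfl⟩, (pv_close_iff _ _).mpr ⟨rfl, ?_⟩⟩
      rw [pv_count_self]
      omega
    · obtain ⟨jn, rfl⟩ : ∃ n : Nat, j = (n : Int) := ⟨j.toNat, (Int.toNat_of_nonneg hj0).symm⟩
      have hl : s1.toList.length = s2.toList.length := by
        unfold PySem.Str.len at hlen
        exact_mod_cast hlen
      have hjn : jn < s1.toList.length := by
        unfold PySem.Str.len at hjlt
        rw [hl]
        exact_mod_cast hjlt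
      have hag := (pv_mask_iff _ _ hl jn hjn).mp ((pv_mask_eq_iff s1 s2 jn).mp hmask)
      have hcnt := (pv_count_le_one_iff _ _ hl).mpr (Or.inr ⟨jn, hjn, hag⟩)
      refine ⟨?_, (pv_close_iff _ _).mpr ⟨hl, hcnt⟩⟩
      rcases pv_share s1 s2 hl jn hag with h | h
      · exact ⟨pvHash1 s2, Or.inl h.symm, Or.inl rfl⟩
      · exact ⟨pvHash2 s2, Or.inr h.symm, Or.inr rfl⟩

-- membership in B's key list
theorem pv_mem_keys_iff (s : String) (k : Int × Int × String) :
    (k ∈ pvKeys s) ↔ ∃ j : Int, 0 ≤ j ∧ j < PySem.Str.len s ∧ k = (PySem.Str.len s, j, pvMask s j) := by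
  simp only [pvKeys, List.mem_map, PySem.List.mem_pyRange_one]
  constructor
  · rintro ⟨j, ⟨hj0, hj1⟩, rfl⟩
    exact ⟨j, hj0, hj1, rfl⟩
  · rintro ⟨j, hj0, hj1, rfl⟩
    exact ⟨j, ⟨hj0, hj1⟩, rfl⟩

-- ===== VERDICT (by name: the statement is the Claim_ definition above) =====
theorem hamming_intersection_spec : Claim_equal_hamming_intersection := by
  intro set1 set2 _
  unfold Spec_hamming_intersection
  simp only [hamming_intersection, hamming_intersection_alt]
  rw [pv_ofList_filter, PySem.List.dedup_eq_ofList set2]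
  apply List.filter_congr
  intro x hx
  have hx2 : x ∈ set2 := (PySem.Set.mem_ofList set2 x).mp hx
  have hnd : ((set1.map (fun s => (s, (1 : Int))) ++ set2.map (fun s => (s, (2 : Int)))).foldl
      pvStep PySem.Dict.empty).keys.Nodup :=
    pv_nodup_keys_buildD _ _ (by rw [PySem.Dict.keys_empty]; exact List.nodup_nil)
  rw [Bool.eq_iff_iff]
  simp only [PySem.Set.contains_iff, PySem.Set.mem_ofList, List.mem_flatMap, List.mem_filter,
    Bool.or_eq_true, List.contains_iff_mem, List.any_eq_true]
  constructor
  · rintro ⟨m, hm, s1, hs1, hxm, hcl⟩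
    rw [PySem.Dict.values_eq_map_keys _ hnd PySem.Dict.empty] at hm
    obtain ⟨h, hk, rfl⟩ := List.mem_map.mp hm
    rw [pv_mem_buildD] at hs1 hxm
    simp only [PySem.Dict.getD_empty, PySem.Set.empty, List.not_mem_nil, false_or] at hs1 hxm
    obtain ⟨hs1L, hh1⟩ := hs1
    obtain ⟨hxL, hh2⟩ := hxm
    rcases (pv_mem_L set1 set2 s1 1).mp hs1L with ⟨hs1m, -⟩ | ⟨-, habs⟩
    · rcases (pv_core s1 x).mp ⟨⟨h, hh1, hh2⟩, hcl⟩ with rfl | ⟨j, hj0, hjlt, hlen, hmask⟩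
      · exact Or.inl hs1m
      · refine Or.inr ⟨(PySem.Str.len x, j, pvMask x j),
          (pv_mem_keys_iff x _).mpr ⟨j, hj0, hjlt, rfl⟩, s1, hs1m, ?_⟩
        refine (pv_mem_keys_iff s1 _).mpr ⟨j, hj0, by rw [hlen]; exact hjlt, ?_⟩
        rw [hlen, hmask]
    · exact absurd habs (by norm_num)
  · intro hB
    have hmain : ∃ s1 ∈ set1,
        (∃ h : String, (h = pvHash1 s1 ∨ h = pvHash2 s1) ∧ (h = pvHash1 x ∨ h = pvHash2 x)) ∧
          pvClose s1 x = true := by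
      rcases hB with hx1 | ⟨k, hk2, s1, hs1, hk1⟩
      · exact ⟨x, hx1, (pv_core x x).mpr (Or.inl rfl)⟩
      · obtain ⟨j, hj0, hjlt, rfl⟩ := (pv_mem_keys_iff s1 k).mp hk1
        obtain ⟨j', hj0', hjlt', hk⟩ := (pv_mem_keys_iff x _).mp hk2
        obtain ⟨h1, h2, h3⟩ : PySem.Str.len s1 = PySem.Str.len x ∧ j = j' ∧
            pvMask s1 j = pvMask x j' := by simpa using hk
        exact ⟨s1, hs1, (pv_core s1 x).mpr (Or.inr ⟨j', hj0', hjlt', h1, h2 ▸ h3⟩)⟩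
    obtain ⟨s1, hs1m, ⟨h, hh1, hh2⟩, hcl⟩ := hmain
    refine ⟨((set1.map (fun s => (s, (1 : Int))) ++ set2.map (fun s => (s, (2 : Int)))).foldl
      pvStep PySem.Dict.empty).getD h PySem.Dict.empty, ?_, s1, ?_, ?_, hcl⟩
    · rw [PySem.Dict.values_eq_map_keys _ hnd PySem.Dict.empty]
      refine List.mem_map.mpr ⟨h, ?_, rfl⟩
      rw [pv_mem_keys_buildD]
      exact Or.inr ⟨(s1, 1), (pv_mem_L set1 set2 s1 1).mpr (Or.inl ⟨hs1m, rfl⟩), hh1⟩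
    · rw [pv_mem_buildD]
      exact Or.inr ⟨(pv_mem_L set1 set2 s1 1).mpr (Or.inl ⟨hs1m, rfl⟩), hh1⟩
    · rw [pv_mem_buildD]
      exact Or.inr ⟨(pv_mem_L set1 set2 x 2).mpr (Or.inr ⟨hx2, rfl⟩), hh2⟩
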